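-- pv_equiv track=rewrite | github.com/natmart/project-eval-4 | pyshort/generator.py | encode_base62_fixed
-- ===== SOURCE A (Python) =====
-- import string
--
-- def encode_base62_fixed(number: int) -> str:
--     """
--     Encode a number to a base62 string (fixed implementation).
--
--     Base62 encoding uses the characters 0-9, a-z, A-Z (in that order) to
--     represent numbers. This is deterministic - the same number always
--     produces the same encoded string.
--
--     Characters are ordered as: 0-9 (0-9), a-z (10-35), A-Z (36-61)
--
--     Args:
--         number: The non-negative integer to encode
--
--     Returns:
--         The base62 encoded string representation of the number
--
--     Raises:
--         ValueError: If number is negative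
--
--     Examples:
--         >>> encode_base62_fixed(0)
--         '0'
--         >>> encode_base62_fixed(10)
--         'a'
--         >>> encode_base62_fixed(61)
--         'Z'
--         >>> encode_base62_fixed(62)
--         '10'
--     """
--     if number < 0:
--         raise ValueError("number must be non-negative")
--
--     # Base62 character set: 0-9, a-z, A-Z
--     characters = string.digits + string.ascii_lowercase + string.ascii_uppercase
--
--     if number == 0:
--         return characters[0]
--
--     encoding = []
--     base = 62
--
--     while number > 0:
--         number, remainder = divmod(number, base)
--         encoding.append(characters[remainder])
--
--     # Reverse to get the correct order
--     return ''.join(reversed(encoding))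
-- ===== SOURCE B (Python) =====
-- import string
--
--
-- def encode_base62_fixed(number: int) -> str:
--     if number < 0:
--         raise ValueError("number must be non-negative")
--     characters = string.digits + string.ascii_lowercase + string.ascii_uppercase
--     # find the largest power of 62 not exceeding the number (1 for 0)
--     p = 1
--     while p * 62 <= number:
--         p *= 62
--     # extract digits most-significant-first by dividing by descending powers
--     out = []
--     while p >= 1:
--         digit, number = divmod(number, p)
--         out.append(characters[digit])
--         p //= 62
--     return ''.join(out)
-- ===== Notes on version B (the rewrite author's own statement) =====
-- stated objective: alternative
-- what changed: Instead of collecting least-significant digits with a divmod-by-62 loop and reversing, B first finds the largest power of 62 not exceeding the number and then extracts digits most-significant-first by dividing by descending powers, building the output in final order with no reversal.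
import Mathlib
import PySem

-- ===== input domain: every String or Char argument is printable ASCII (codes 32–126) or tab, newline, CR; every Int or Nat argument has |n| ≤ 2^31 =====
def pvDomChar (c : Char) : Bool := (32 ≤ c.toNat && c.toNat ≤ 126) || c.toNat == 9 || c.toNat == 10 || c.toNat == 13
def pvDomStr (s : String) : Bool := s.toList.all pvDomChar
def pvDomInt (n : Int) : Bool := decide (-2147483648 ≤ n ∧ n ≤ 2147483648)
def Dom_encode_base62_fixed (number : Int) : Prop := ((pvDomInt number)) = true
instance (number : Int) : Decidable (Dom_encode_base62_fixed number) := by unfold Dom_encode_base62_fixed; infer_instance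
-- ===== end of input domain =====

-- B replaces A's LSB-first divmod loop + final reversal by a different algorithm:
-- find the largest power of 62 not exceeding the number, then peel digits
-- most-significant-first by dividing by descending powers (no reversal).

-- characters = string.digits + string.ascii_lowercase + string.ascii_uppercase
def pvCharsB62 : List Char :=
  "0123456789abcdefghijklmnopqrstuvwxyzABCDEFGHIJKLMNOPQRSTUVWXYZ".toList

-- termination helper: the floor quotient by 62 strictly shrinks a positive n
theorem pvFdiv62_lt (n : Int) (h : 0 < n) : (PySem.Int.floordiv n 62).toNat < n.toNat := by
  rw [PySem.Int.floordiv_eq_ediv_of_pos (by omega)]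
  omega

-- ===== PORT A =====
-- while number > 0: number, remainder = divmod(number, 62); encoding.append(characters[remainder])
def pvALoop (n : Int) : List Char :=
  if h : 0 < n then
    pvCharsB62.getD (PySem.Int.mod n 62).toNat ' ' :: pvALoop (PySem.Int.floordiv n 62)
  else []
termination_by n.toNat
decreasing_by exact pvFdiv62_lt n h

def encode_base62_fixed (number : Int) : String :=
  if number < 0 then ""            -- Python raises ValueError here; excluded by Pre_
  else if number = 0 then String.ofList [pvCharsB62.getD 0 ' ']
  else String.ofList (pvALoop number).reverse

-- ===== PORT B =====
-- p = 1; while p * 62 <= number: p *= 62   (the '1 ≤ p' conjunct only makes the loop total)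
def pvFindPow (n p : Int) : Int :=
  if h : 1 ≤ p ∧ p * 62 ≤ n then pvFindPow n (p * 62) else p
termination_by (n - p).toNat
decreasing_by omega

-- while p >= 1: digit, number = divmod(number, p); out.append(characters[digit]); p //= 62
def pvExtract (n p : Int) : List Char :=
  if h : 1 ≤ p then
    pvCharsB62.getD (PySem.Int.floordiv n p).toNat ' ' ::
      pvExtract (PySem.Int.mod n p) (PySem.Int.floordiv p 62)
  else []
termination_by p.toNat
decreasing_by exact pvFdiv62_lt p h

def encode_base62_fixed_alt (number : Int) : String :=
  if number < 0 then ""            -- Python raises ValueError here; excluded by Pre_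
  else String.ofList (pvExtract number (pvFindPow number 1))

-- ===== PRECONDITION & SPEC =====
-- A raises ValueError exactly on negative input; Pre_ excludes only those.
def Pre_encode_base62_fixed (number : Int) : Prop := 0 ≤ number
instance (number : Int) : Decidable (Pre_encode_base62_fixed number) := by
  unfold Pre_encode_base62_fixed; infer_instance

def pvWitness_encode_base62_fixed : Int := (62)

def Spec_encode_base62_fixed (number : Int) (out : String) : Prop := out = encode_base62_fixed_alt number
instance (number : Int) (out : String) : Decidable (Spec_encode_base62_fixed number out) := by
  unfold Spec_encode_base62_fixed; infer_instance

-- ===== CLAIM (what is proved, stated in full; the proofs are below) =====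
def Claim_equal_encode_base62_fixed : Prop := ∀ (number : Int), Dom_encode_base62_fixed number → Pre_encode_base62_fixed number → Spec_encode_base62_fixed number (encode_base62_fixed number)

-- ===== LEMMAS AND PROOFS =====

-- Nat mirrors of the two loops, for the digit arithmetic
def pvALoopN (n : ℕ) : List Char :=
  if h : n = 0 then [] else pvCharsB62.getD (n % 62) ' ' :: pvALoopN (n / 62)
decreasing_by exact Nat.div_lt_self (by omega) (by omega)

def pvExtractN (n p : ℕ) : List Char :=
  if h : p = 0 then [] else pvCharsB62.getD (n / p) ' ' :: pvExtractN (n % p) (p / 62)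
termination_by p
decreasing_by exact Nat.div_lt_self (by omega) (by omega)

theorem pvCharsB62_zero : pvCharsB62.getD 0 ' ' = '0' := by decide

theorem pvALoopN_zero : pvALoopN 0 = [] := by rw [pvALoopN]; simp

theorem pvALoop_toNat (n : Int) : pvALoop n = pvALoopN n.toNat := by
  induction n using pvALoop.induct with
  | case1 n h ih =>
    have hm : (PySem.Int.mod n 62).toNat = n.toNat % 62 := by
      rw [PySem.Int.mod_eq_emod_of_pos (by omega)]; omega
    have hd : (PySem.Int.floordiv n 62).toNat = n.toNat / 62 := by
      rw [PySem.Int.floordiv_eq_ediv_of_pos (by omega)]; omega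
    rw [pvALoop, dif_pos h, pvALoopN, dif_neg (by omega : ¬ n.toNat = 0), hm, ih, hd]
  | case2 n h =>
    rw [pvALoop, dif_neg h, pvALoopN, dif_pos (by omega)]

theorem pvExtract_toNat : ∀ (n p : Int), 0 ≤ n → pvExtract n p = pvExtractN n.toNat p.toNat := by
  intro n p
  induction n, p using pvExtract.induct with
  | case1 n p h ih =>
    intro hn
    have hp : (0:Int) < p := by omega
    have hmod : 0 ≤ PySem.Int.mod n p := by
      rw [PySem.Int.mod_eq_emod_of_pos hp]; exact Int.emod_nonneg n (by omega)
    have e1 : PySem.Int.floordiv n p = ((n.toNat / p.toNat : ℕ) : Int) := by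
      rw [PySem.Int.floordiv_eq_ediv_of_pos hp, Int.natCast_ediv,
        Int.toNat_of_nonneg hn, Int.toNat_of_nonneg hp.le]
    have e2 : PySem.Int.mod n p = ((n.toNat % p.toNat : ℕ) : Int) := by
      rw [PySem.Int.mod_eq_emod_of_pos hp, Int.natCast_emod,
        Int.toNat_of_nonneg hn, Int.toNat_of_nonneg hp.le]
    have e3 : PySem.Int.floordiv p 62 = ((p.toNat / 62 : ℕ) : Int) := by
      rw [PySem.Int.floordiv_eq_ediv_of_pos (by omega), Int.natCast_ediv,
        Int.toNat_of_nonneg hp.le]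
      norm_num
    have h1 : (PySem.Int.floordiv n p).toNat = n.toNat / p.toNat := by
      rw [e1, Int.toNat_natCast]
    have h2 : (PySem.Int.mod n p).toNat = n.toNat % p.toNat := by
      rw [e2, Int.toNat_natCast]
    have h3 : (PySem.Int.floordiv p 62).toNat = p.toNat / 62 := by
      rw [e3, Int.toNat_natCast]
    have hrec := ih hmod
    rw [h2, h3] at hrec
    rw [pvExtract, dif_pos h, pvExtractN, dif_neg (by omega : ¬ p.toNat = 0), h1, hrec]
  | case2 n p h =>
    intro hn
    rw [pvExtract, dif_neg h, pvExtractN, dif_pos (by omega)]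

theorem pvFindPow_spec : ∀ (n p : Int), 1 ≤ p →
    ∃ k : ℕ, pvFindPow n p = p * 62 ^ k ∧ n < p * 62 ^ (k + 1) ∧ (p * 62 ^ k ≤ n ∨ k = 0) := by
  intro n p
  induction p using pvFindPow.induct (n := n) with
  | case1 p h ih =>
    intro hp
    obtain ⟨k, e, ub, lb⟩ := ih (by omega : (1:Int) ≤ p * 62)
    refine ⟨k + 1, ?_, ?_, ?_⟩
    · rw [pvFindPow, dif_pos h, e]; ring
    · have e2 : p * 62 * 62 ^ (k + 1) = p * 62 ^ (k + 1 + 1) := by ring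
      rw [← e2]; exact ub
    · left
      rcases lb with hl | h0
      · have e3 : p * 62 ^ (k + 1) = p * 62 * 62 ^ k := by ring
        rw [e3]; exact hl
      · subst h0
        have e4 : p * 62 ^ (0 + 1) = p * 62 := by ring
        rw [e4]; exact h.2
  | case2 p h =>
    intro hp
    refine ⟨0, by rw [pvFindPow, dif_neg h]; ring, ?_, Or.inr rfl⟩
    have e5 : p * 62 ^ (0 + 1) = p * 62 := by ring
    rw [e5]; omega

theorem pvLenLe : ∀ k n : ℕ, n < 62 ^ k → (pvALoopN n).length ≤ k := by
  intro k
  induction k with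
  | zero =>
    intro n h
    have : n = 0 := by simpa using h
    subst this
    simp [pvALoopN_zero]
  | succ k ih =>
    intro n h
    rw [pvALoopN]
    split
    · simp
    · simp only [List.length_cons]
      have e : (62:ℕ) ^ (k + 1) = 62 * 62 ^ k := by ring
      have hq : n / 62 < 62 ^ k := by omega
      have := ih (n / 62) hq
      omega

theorem pvLenGe : ∀ k n : ℕ, 62 ^ k ≤ n → k + 1 ≤ (pvALoopN n).length := by
  intro k
  induction k with
  | zero =>
    intro n h
    rw [pvALoopN, dif_neg (by omega)]
    simp
  | succ k ih =>
    intro n h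
    have hpos : 0 < (62:ℕ) ^ (k + 1) := by positivity
    rw [pvALoopN, dif_neg (by omega)]
    simp only [List.length_cons]
    have e : (62:ℕ) ^ (k + 1) = 62 * 62 ^ k := by ring
    have hq : 62 ^ k ≤ n / 62 := by omega
    have := ih (n / 62) hq
    omega

-- digit decomposition of A's loop at the top power
theorem pvK : ∀ k n : ℕ, 62 ^ (k + 1) ≤ n → n < 62 ^ (k + 2) →
    pvALoopN n = pvALoopN (n % 62 ^ (k + 1))
      ++ List.replicate (k + 1 - (pvALoopN (n % 62 ^ (k + 1))).length) '0'
      ++ [pvCharsB62.getD (n / 62 ^ (k + 1)) ' '] := by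
  intro k
  induction k with
  | zero =>
    intro n h1 h2
    norm_num at h1 h2 ⊢
    have hq2 : n / 62 < 62 := by omega
    have hA : pvALoopN n = pvCharsB62.getD (n % 62) ' ' :: [pvCharsB62.getD (n / 62) ' '] := by
      rw [pvALoopN, dif_neg (by omega)]
      congr 1
      rw [pvALoopN, dif_neg (by omega)]
      have e1 : n / 62 % 62 = n / 62 := by omega
      have e2 : n / 62 / 62 = 0 := by omega
      rw [e1, e2, pvALoopN_zero]
    rw [hA]
    by_cases hm : n % 62 = 0
    · rw [hm, pvCharsB62_zero, pvALoopN_zero]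
      simp
    · have hA2 : pvALoopN (n % 62) = [pvCharsB62.getD (n % 62) ' '] := by
        rw [pvALoopN, dif_neg hm]
        have e1 : n % 62 % 62 = n % 62 := by omega
        have e2 : n % 62 / 62 = 0 := by omega
        rw [e1, e2, pvALoopN_zero]
      rw [hA2]
      simp
  | succ k ih =>
    intro n h1 h2
    have hn0 : n ≠ 0 := by
      have : 0 < (62:ℕ) ^ (k + 1 + 1) := by positivity
      omega
    have epow1 : (62:ℕ) ^ (k + 1 + 1) = 62 * 62 ^ (k + 1) := by ring
    have epow2 : (62:ℕ) ^ (k + 1 + 2) = 62 * 62 ^ (k + 2) := by ring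
    have hq1 : 62 ^ (k + 1) ≤ n / 62 := by omega
    have hq2 : n / 62 < 62 ^ (k + 2) := by omega
    have ihq := ih (n / 62) hq1 hq2
    have hm' : n / 62 % 62 ^ (k + 1) = n % 62 ^ (k + 1 + 1) / 62 := by
      have h := Nat.mod_mul_right_div_self n 62 (62 ^ (k + 1))
      rw [← epow1] at h
      exact h.symm
    have hq' : n / 62 / 62 ^ (k + 1) = n / 62 ^ (k + 1 + 1) := by
      rw [Nat.div_div_eq_div_mul]
      congr 1
      rw [epow1]
    have hmod62 : n % 62 ^ (k + 1 + 1) % 62 = n % 62 :=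
      Nat.mod_mod_of_dvd n (dvd_pow_self 62 (by omega))
    rw [pvALoopN, dif_neg hn0, ihq, hm', hq']
    by_cases hm0 : n % 62 ^ (k + 1 + 1) = 0
    · have h62 : n % 62 = 0 := by rw [← hmod62, hm0]
      rw [hm0, h62, pvCharsB62_zero]
      simp [pvALoopN_zero, List.replicate_succ]
    · have hAm : pvALoopN (n % 62 ^ (k + 1 + 1)) =
          pvCharsB62.getD (n % 62 ^ (k + 1 + 1) % 62) ' ' :: pvALoopN (n % 62 ^ (k + 1 + 1) / 62) := by
        rw [pvALoopN, dif_neg hm0]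
      rw [hAm, hmod62]
      simp only [List.length_cons]
      have hsub : k + 1 + 1 - ((pvALoopN (n % 62 ^ (k + 1 + 1) / 62)).length + 1)
          = k + 1 - (pvALoopN (n % 62 ^ (k + 1 + 1) / 62)).length := by omega
      rw [hsub]
      simp

-- the MSB-first extraction equals the zero-padded reversed LSB list
theorem pvP : ∀ k n : ℕ, n < 62 ^ (k + 1) →
    pvExtractN n (62 ^ k)
      = List.replicate (k + 1 - (pvALoopN n).length) '0' ++ (pvALoopN n).reverse := by
  intro k
  induction k with
  | zero =>
    intro n h
    norm_num at h
    rw [pow_zero, pvExtractN, dif_neg (by norm_num)]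
    have hz : pvExtractN (n % 1) (1 / 62) = [] := by rw [pvExtractN]; simp
    rw [hz, Nat.div_one]
    by_cases h0 : n = 0
    · subst h0
      rw [pvCharsB62_zero, pvALoopN_zero]
      simp
    · have hA : pvALoopN n = [pvCharsB62.getD n ' '] := by
        rw [pvALoopN, dif_neg h0]
        have e1 : n % 62 = n := by omega
        have e2 : n / 62 = 0 := by omega
        rw [e1, e2, pvALoopN_zero]
      rw [hA]
      simp
  | succ k ih =>
    intro n h
    have hpos : (62:ℕ) ^ (k + 1) ≠ 0 := by positivity
    have hdiv : (62:ℕ) ^ (k + 1) / 62 = 62 ^ k := by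
      have e : (62:ℕ) ^ (k + 1) = 62 ^ k * 62 := by ring
      rw [e, Nat.mul_div_cancel _ (by omega)]
    rw [pvExtractN, dif_neg hpos, hdiv]
    have hmlt : n % 62 ^ (k + 1) < 62 ^ (k + 1) := Nat.mod_lt _ (by positivity)
    rw [ih (n % 62 ^ (k + 1)) hmlt]
    by_cases hlt : n < 62 ^ (k + 1)
    · have e1 : n / 62 ^ (k + 1) = 0 := Nat.div_eq_of_lt hlt
      have e2 : n % 62 ^ (k + 1) = n := Nat.mod_eq_of_lt hlt
      have hlen : (pvALoopN n).length ≤ k + 1 := pvLenLe (k + 1) n hlt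
      have hsub : k + 1 + 1 - (pvALoopN n).length = (k + 1 - (pvALoopN n).length) + 1 := by omega
      rw [e1, e2, pvCharsB62_zero, hsub, List.replicate_succ]
      simp
    · have hge : 62 ^ (k + 1) ≤ n := by omega
      have hK := pvK k n hge h
      have hlen : (pvALoopN n).length = k + 2 :=
        le_antisymm (pvLenLe (k + 2) n h) (pvLenGe (k + 1) n hge)
      have hsub : k + 1 + 1 - (pvALoopN n).length = 0 := by omega
      rw [hsub, hK]
      simp [List.reverse_append]

theorem pvMainN (k n : ℕ) (h1 : 62 ^ k ≤ n) (h2 : n < 62 ^ (k + 1)) :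
    pvExtractN n (62 ^ k) = (pvALoopN n).reverse := by
  have hlen : (pvALoopN n).length = k + 1 :=
    le_antisymm (pvLenLe (k + 1) n h2) (pvLenGe k n h1)
  rw [pvP k n h2, hlen]
  simp

-- ===== VERDICT (by name: the statement is the Claim_ definition above) =====
theorem encode_base62_fixed_spec : Claim_equal_encode_base62_fixed := by
  intro n _ hpre
  unfold Spec_encode_base62_fixed encode_base62_fixed encode_base62_fixed_alt
  have hpre' : (0:Int) ≤ n := hpre
  have hnot : ¬ n < 0 := by omega
  rw [if_neg hnot, if_neg hnot]
  by_cases h0 : n = 0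
  · subst h0
    rw [if_pos rfl]
    have hfp : pvFindPow 0 1 = 1 := by rw [pvFindPow, dif_neg (by omega)]
    rw [hfp, pvExtract_toNat 0 1 (by omega)]
    have hx : pvExtractN (0:Int).toNat (1:Int).toNat = [pvCharsB62.getD 0 ' '] := by
      have e : (0:Int).toNat = 0 ∧ (1:Int).toNat = 1 := by omega
      rw [e.1, e.2, pvExtractN, dif_neg (by omega)]
      have hz : pvExtractN (0 % 1) (1 / 62) = [] := by rw [pvExtractN]; simp
      rw [hz, Nat.div_one]
    rw [hx]
  · rw [if_neg h0]
    obtain ⟨k, hfp, hub, hdisj⟩ := pvFindPow_spec n 1 le_rfl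
    simp only [one_mul] at hfp hub hdisj
    have hlb : (62:Int) ^ k ≤ n := by
      rcases hdisj with hl | hk
      · exact hl
      · subst hk; simpa using (by omega : (1:Int) ≤ n)
    rw [hfp, pvExtract_toNat n _ hpre', pvALoop_toNat]
    have hcast : ∀ j : ℕ, (62:Int) ^ j = ((62 ^ j : ℕ) : Int) := by
      intro j; push_cast; ring
    have hc : ((62:Int) ^ k).toNat = 62 ^ k := by rw [hcast k, Int.toNat_natCast]
    have h1 : 62 ^ k ≤ n.toNat := by
      have := hlb; rw [hcast k] at this; omega
    have h2 : n.toNat < 62 ^ (k + 1) := by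
      have := hub; rw [hcast (k + 1)] at this; omega
    rw [hc, pvMainN k n.toNat h1 h2]
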